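-- pv_equiv track=rewrite | github.com/TaegonAndreaSehoKim/SweepAgent | scripts/train_dqn_sliced.py | build_slice_schedule
-- ===== SOURCE A (Python) =====
-- def build_slice_schedule(
--     total_episodes: int,
--     slice_episodes: int,
--     starting_checkpoint_episodes: int,
-- ) -> list[int]:
--     if slice_episodes <= 0:
--         raise ValueError("--slice-episodes must be positive.")
--     if total_episodes <= 0:
--         raise ValueError("--total-episodes must be positive.")
--     if starting_checkpoint_episodes < 0:
--         raise ValueError("--starting-checkpoint-episodes cannot be negative.")
--     if starting_checkpoint_episodes >= total_episodes:
--         raise ValueError(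
--             "starting checkpoint episodes already reach or exceed --total-episodes."
--         )
--
--     remaining = total_episodes - starting_checkpoint_episodes
--     schedule: list[int] = []
--     while remaining > 0:
--         current_slice = min(slice_episodes, remaining)
--         schedule.append(current_slice)
--         remaining -= current_slice
--     return schedule
-- ===== SOURCE B (Python) =====
-- def build_slice_schedule(
--     total_episodes: int,
--     slice_episodes: int,
--     starting_checkpoint_episodes: int,
-- ) -> list[int]:
--     if slice_episodes <= 0:
--         raise ValueError("--slice-episodes must be positive.")
--     if total_episodes <= 0:
--         raise ValueError("--total-episodes must be positive.")
--     if starting_checkpoint_episodes < 0: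
--         raise ValueError("--starting-checkpoint-episodes cannot be negative.")
--     if starting_checkpoint_episodes >= total_episodes:
--         raise ValueError(
--             "starting checkpoint episodes already reach or exceed --total-episodes."
--         )
--
--     remaining = total_episodes - starting_checkpoint_episodes
--     full, rem = divmod(remaining, slice_episodes)
--     schedule = [slice_episodes] * full
--     if rem > 0:
--         schedule.append(rem)
--     return schedule
-- ===== Notes on version B (the rewrite author's own statement) =====
-- stated objective: simpler
-- what changed: Replaces the subtract-and-append while loop with a closed-form divmod: the schedule is [slice_episodes] repeated remaining // slice_episodes times plus the positive remainder if any.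
import Mathlib
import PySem

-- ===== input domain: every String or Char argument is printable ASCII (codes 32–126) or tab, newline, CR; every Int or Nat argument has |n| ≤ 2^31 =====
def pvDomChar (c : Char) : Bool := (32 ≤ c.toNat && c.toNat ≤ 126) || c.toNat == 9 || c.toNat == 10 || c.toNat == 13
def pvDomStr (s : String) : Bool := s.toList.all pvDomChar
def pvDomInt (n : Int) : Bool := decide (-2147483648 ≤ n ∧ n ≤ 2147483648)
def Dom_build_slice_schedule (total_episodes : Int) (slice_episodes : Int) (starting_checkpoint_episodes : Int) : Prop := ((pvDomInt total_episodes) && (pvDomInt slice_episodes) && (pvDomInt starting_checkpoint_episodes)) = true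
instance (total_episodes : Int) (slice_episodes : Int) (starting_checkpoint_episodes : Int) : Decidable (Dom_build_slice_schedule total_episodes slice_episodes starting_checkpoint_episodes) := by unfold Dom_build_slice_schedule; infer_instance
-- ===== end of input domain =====

-- B replaces A's subtract-and-append while loop by a closed-form divmod (replicate + optional remainder); objective: simpler.


-- ===== PORT A =====
-- A's while loop; fuel = remaining.toNat bounds the iteration count (each step subtracts ≥ 1 under Pre_).
def bssLoopA (slice : Int) : Nat → Int → List Int
  | 0, _ => []
  | fuel + 1, remaining =>
    if remaining > 0 then
      min slice remaining :: bssLoopA slice fuel (remaining - min slice remaining)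
    else []

def build_slice_schedule (total_episodes : Int) (slice_episodes : Int) (starting_checkpoint_episodes : Int) : List Int :=
  bssLoopA slice_episodes (total_episodes - starting_checkpoint_episodes).toNat (total_episodes - starting_checkpoint_episodes)

-- ===== PORT B =====
def build_slice_schedule_alt (total_episodes : Int) (slice_episodes : Int) (starting_checkpoint_episodes : Int) : List Int :=
  let remaining := total_episodes - starting_checkpoint_episodes
  let full := PySem.Int.floordiv remaining slice_episodes
  let rem := PySem.Int.mod remaining slice_episodes
  let schedule := List.replicate full.toNat slice_episodes
  if rem > 0 then schedule ++ [rem] else schedule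

-- ===== PRECONDITION & SPEC =====
-- A raises ValueError unless slice_episodes > 0, total_episodes > 0 and 0 ≤ starting < total; Pre_ is exactly those guards.
def Pre_build_slice_schedule (total_episodes : Int) (slice_episodes : Int) (starting_checkpoint_episodes : Int) : Prop :=
  0 < slice_episodes ∧ 0 < total_episodes ∧ 0 ≤ starting_checkpoint_episodes ∧ starting_checkpoint_episodes < total_episodes
instance (total_episodes : Int) (slice_episodes : Int) (starting_checkpoint_episodes : Int) : Decidable (Pre_build_slice_schedule total_episodes slice_episodes starting_checkpoint_episodes) := by unfold Pre_build_slice_schedule; infer_instance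

def pvWitness_build_slice_schedule : Int × Int × Int := (10, 3, 2)

def Spec_build_slice_schedule (total_episodes : Int) (slice_episodes : Int) (starting_checkpoint_episodes : Int) (out : List Int) : Prop := out = build_slice_schedule_alt total_episodes slice_episodes starting_checkpoint_episodes
instance (total_episodes : Int) (slice_episodes : Int) (starting_checkpoint_episodes : Int) (out : List Int) : Decidable (Spec_build_slice_schedule total_episodes slice_episodes starting_checkpoint_episodes out) := by unfold Spec_build_slice_schedule; infer_instance

-- ===== CLAIM (what is proved, stated in full; the proofs are below) =====
def Claim_equal_build_slice_schedule : Prop := ∀ (total_episodes : Int) (slice_episodes : Int) (starting_checkpoint_episodes : Int), Dom_build_slice_schedule total_episodes slice_episodes starting_checkpoint_episodes → Pre_build_slice_schedule total_episodes slice_episodes starting_checkpoint_episodes → Spec_build_slice_schedule total_episodes slice_episodes starting_checkpoint_episodes (build_slice_schedule total_episodes slice_episodes starting_checkpoint_episodes)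

-- ===== LEMMAS AND PROOFS =====

-- Loop invariant: for positive slice and enough fuel, the loop produces the divmod-shaped list.
lemma bssLoopA_eq (s : Int) (hs : 0 < s) :
    ∀ (n : Nat) (r : Int), 0 ≤ r → r.toNat ≤ n →
      bssLoopA s n r =
        List.replicate (PySem.Int.floordiv r s).toNat s ++
          (if PySem.Int.mod r s > 0 then [PySem.Int.mod r s] else []) := by
  intro n
  induction n with
  | zero =>
    intro r hr hle
    have hr0 : r = 0 := by omega
    subst hr0
    simp [bssLoopA, PySem.Int.floordiv, PySem.Int.mod]
  | succ n ih =>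
    intro r hr hle
    rw [PySem.Int.floordiv_eq_ediv_of_pos hs, PySem.Int.mod_eq_emod_of_pos hs]
    by_cases hpos : r > 0
    · by_cases hbig : s < r
      · -- full slice, recurse
        have hmin : min s r = s := by omega
        have ih' := ih (r - s) (by omega) (by omega)
        rw [PySem.Int.floordiv_eq_ediv_of_pos hs, PySem.Int.mod_eq_emod_of_pos hs] at ih'
        have hdiv : r / s = (r - s) / s + 1 := by
          have := Int.add_mul_ediv_right (r - s) 1 (by omega : s ≠ 0)
          simpa [sub_add_cancel] using this
        have hmod : (r - s) % s = r % s := Int.sub_emod_right r s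
        have hq : 0 ≤ (r - s) / s := Int.ediv_nonneg (by omega) (by omega)
        have htn : (r / s).toNat = ((r - s) / s).toNat + 1 := by omega
        simp only [bssLoopA, if_pos hpos, hmin, ih', hmod, htn, List.replicate_succ,
          List.cons_append]
      · -- last (or only) partial/full slice: 0 < r ≤ s
        have hmin : min s r = r := by omega
        have hend : ∀ m, bssLoopA s m 0 = [] := by
          intro m; cases m <;> simp [bssLoopA]
        by_cases heq : r = s
        · subst heq
          simp [bssLoopA, hend, hpos, Int.ediv_self (by omega : r ≠ 0)]
        · have hlt : r < s := by omega
          have hd : r / s = 0 := Int.ediv_eq_zero_of_lt (by omega) hlt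
          have hm : r % s = r := Int.emod_eq_of_lt (by omega) hlt
          simp [bssLoopA, hmin, hend, hd, hm, hpos]
    · have hr0 : r = 0 := by omega
      subst hr0
      simp [bssLoopA]

-- ===== VERDICT (by name: the statement is the Claim_ definition above) =====
theorem build_slice_schedule_spec : Claim_equal_build_slice_schedule := by
  intro t s c _ hpre
  obtain ⟨hs, ht, hc0, hct⟩ := hpre
  unfold Spec_build_slice_schedule build_slice_schedule build_slice_schedule_alt
  rw [bssLoopA_eq s hs (t - c).toNat (t - c) (by omega) (le_refl _)]
  by_cases hm : PySem.Int.mod (t - c) s > 0 <;> simp [hm]
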